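-- pv_equiv track=rewrite | github.com/joohyun333/Algorithm_Study_Group | 6주차/3/p3_kimje0322.py | solution
-- ===== SOURCE A (Python) =====
-- from collections import deque
--
-- def solution(prices,d,k):
--     prices.sort()
--     answer = 0
--     # 조건1
--     if prices[-1] - prices[0] <= d:
--         answer = sum(prices) // len(prices)
--     # 조건2
--     else:
--         if prices[-2] - prices[1] <= d:
--             prices = deque(prices)
--             prices.pop()
--             prices.popleft()
--             answer = sum(prices) // len(prices)
--         # 조건3
--         else:
--             queue = deque()
--             idx, tmp = 0, 0
--             flag = False
--             while idx < len(prices):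
--                 if len(queue) < k:
--                     queue.append(prices[idx])
--                     tmp += prices[idx]
--                 if len(queue) == k:
--                     min_num = queue[0]
--                     max_num = queue[-1]
--                     if max_num - min_num <= d:
--                         answer = tmp // len(queue)
--                         flag = True
--                         break
--                     queue.popleft()
--                     tmp -= min_num
--                 idx += 1
--             if not flag:
--                 n = len(prices)
--                 if n % 2:
--                     answer = prices[n//2]
--                 else:
--                     answer = prices[n//2-1]
--     return answer
-- ===== SOURCE B (Python) =====
-- def solution(prices, d, k):
--     prices.sort()
--     n = len(prices)
--     pref = [0]
--     for x in prices:
--         pref.append(pref[-1] + x)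
--     if prices[-1] - prices[0] <= d:
--         return pref[n] // n
--     if prices[-2] - prices[1] <= d:
--         return (pref[n - 1] - pref[1]) // (n - 2)
--     if k >= 1:
--         for i in range(n - k + 1):
--             # upper-bound binary search: first index in [i, n) with value > prices[i] + d
--             lo, hi = i, n
--             while lo < hi:
--                 mid = (lo + hi) // 2
--                 if prices[mid] <= prices[i] + d:
--                     lo = mid + 1
--                 else:
--                     hi = mid
--             if lo - i >= k:
--                 return (pref[i + k] - pref[i]) // k
--     return prices[n // 2] if n % 2 else prices[n // 2 - 1]
-- ===== Notes on version B (the rewrite author's own statement) =====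
-- stated objective: alternative
-- what changed: Condition 3 no longer slides a deque with a running sum and flag: B precomputes a prefix-sum array once and, for each start index, runs an upper-bound binary search on the sorted list to count how many values fit within d, reading the window sum off the prefix array; conditions 1 and 2 also read their sums from the prefix array, and early returns replace the answer variable.
import Mathlib
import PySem

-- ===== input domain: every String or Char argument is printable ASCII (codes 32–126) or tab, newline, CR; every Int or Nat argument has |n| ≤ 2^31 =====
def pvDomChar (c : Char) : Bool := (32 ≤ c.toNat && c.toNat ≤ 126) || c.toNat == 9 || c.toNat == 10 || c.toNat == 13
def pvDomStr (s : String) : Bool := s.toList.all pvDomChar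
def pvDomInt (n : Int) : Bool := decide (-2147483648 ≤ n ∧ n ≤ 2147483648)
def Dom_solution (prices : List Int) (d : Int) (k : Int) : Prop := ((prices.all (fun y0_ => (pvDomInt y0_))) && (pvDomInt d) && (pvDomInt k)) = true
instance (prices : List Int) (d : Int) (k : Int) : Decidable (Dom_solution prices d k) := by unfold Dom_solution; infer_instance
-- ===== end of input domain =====

-- B replaces A's deque/running-sum/flag sliding window with a prefix-sum array plus a per-start
-- upper-bound binary search, and the answer variable with early returns (objective: alternative).
-- Both A and B sort the argument list in place; the equivalence proved here is about the return value.

-- ===== PORT A =====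
-- A's condition-3 while loop: state (idx, queue, tmp); `none` = loop ended with flag still False.
-- `rem` is the fuel `len(prices) - idx`, so `rem = 0` is exactly the exit test `idx < len(prices)` failing.
def solutionLoopA (s : List Int) (d : Int) (k : Int) : Nat → Nat → List Int → Int → Option Int
  | 0, _, _, _ => none
  | rem+1, idx, queue, tmp =>
    let queue' := if (queue.length : Int) < k then queue ++ [PySem.List.pyGetD s (idx : Int) 0] else queue
    let tmp' := if (queue.length : Int) < k then tmp + PySem.List.pyGetD s (idx : Int) 0 else tmp
    if (queue'.length : Int) = k then
      let mn := PySem.List.pyGetD queue' 0 0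
      let mx := PySem.List.pyGetD queue' (-1) 0
      if mx - mn ≤ d then some (PySem.Int.floordiv tmp' (queue'.length : Int))
      else solutionLoopA s d k rem (idx+1) (queue'.drop 1) (tmp' - mn)
    else solutionLoopA s d k rem (idx+1) queue' tmp'

def solution (prices : List Int) (d : Int) (k : Int) : Int :=
  let s := PySem.List.sorted prices (fun x => x) false   -- prices.sort()
  if PySem.List.pyGetD s (-1) 0 - PySem.List.pyGetD s 0 0 ≤ d then
    PySem.Int.floordiv s.sum (s.length : Int)
  else if PySem.List.pyGetD s (-2) 0 - PySem.List.pyGetD s 1 0 ≤ d then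
    let q := s.dropLast        -- prices = deque(prices); prices.pop()
    let q2 := q.drop 1         -- prices.popleft()
    PySem.Int.floordiv q2.sum (q2.length : Int)
  else
    match solutionLoopA s d k s.length 0 [] 0 with
    | some a => a
    | none =>
        if s.length % 2 = 1 then PySem.List.pyGetD s ((s.length / 2 : Nat) : Int) 0
        else PySem.List.pyGetD s (((s.length / 2 : Nat) : Int) - 1) 0

-- ===== PORT B =====
-- B's inner `while lo < hi` upper-bound binary search; fuel ≥ hi - lo makes it total.
def bsearchB (s : List Int) (t : Int) : Nat → Int → Int → Int
  | 0, lo, _ => lo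
  | f+1, lo, hi =>
    if lo < hi then
      let mid := PySem.Int.floordiv (lo + hi) 2
      if PySem.List.pyGetD s mid 0 ≤ t then bsearchB s t f (mid+1) hi
      else bsearchB s t f lo mid
    else lo

-- B's `for i in range(n - k + 1)` loop; `none` = fell through without returning.
def solutionLoopB (s pref : List Int) (d : Int) (k : Int) : Nat → Nat → Option Int
  | 0, _ => none
  | f+1, i =>
    if (i : Int) < (s.length : Int) - k + 1 then
      let lo := bsearchB s (PySem.List.pyGetD s (i : Int) 0 + d) (s.length + 1) (i : Int) (s.length : Int)
      if k ≤ lo - (i : Int) then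
        some (PySem.Int.floordiv (PySem.List.pyGetD pref ((i : Int) + k) 0 - PySem.List.pyGetD pref (i : Int) 0) k)
      else solutionLoopB s pref d k f (i+1)
    else none

def solution_alt (prices : List Int) (d : Int) (k : Int) : Int :=
  let s := PySem.List.sorted prices (fun x => x) false   -- prices.sort()
  let pref := s.foldl (fun pref x => pref ++ [PySem.List.pyGetD pref (-1) 0 + x]) [0]
  if PySem.List.pyGetD s (-1) 0 - PySem.List.pyGetD s 0 0 ≤ d then
    PySem.Int.floordiv (PySem.List.pyGetD pref (s.length : Int) 0) (s.length : Int)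
  else if PySem.List.pyGetD s (-2) 0 - PySem.List.pyGetD s 1 0 ≤ d then
    PySem.Int.floordiv (PySem.List.pyGetD pref ((s.length : Int) - 1) 0 - PySem.List.pyGetD pref 1 0) ((s.length : Int) - 2)
  else
    match (if 1 ≤ k then solutionLoopB s pref d k (s.length + 1) 0 else none) with
    | some a => a
    | none =>
        if s.length % 2 = 1 then PySem.List.pyGetD s ((s.length / 2 : Nat) : Int) 0
        else PySem.List.pyGetD s (((s.length / 2 : Nat) : Int) - 1) 0

-- ===== PRECONDITION & SPEC =====
-- Pre_ excludes exactly the inputs where the Python A raises: the empty list (IndexError on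
-- prices[-1]); a singleton with d < 0 (IndexError on prices[-2]); a pair whose trimmed middle is
-- empty but passes condition 2 (ZeroDivisionError); and k == 0 reaching condition 3 (IndexError on
-- queue[0]).  A returns normally on every other input.
def Pre_solution (prices : List Int) (d : Int) (k : Int) : Prop :=
  let s := PySem.List.sorted prices (fun x => x) false
  prices ≠ [] ∧
  ¬ (s.length = 1 ∧ d < 0) ∧
  ¬ (s.length = 2 ∧ ¬ (PySem.List.pyGetD s (-1) 0 - PySem.List.pyGetD s 0 0 ≤ d) ∧
       (PySem.List.pyGetD s (-2) 0 - PySem.List.pyGetD s 1 0 ≤ d)) ∧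
  ¬ (k = 0 ∧ ¬ (PySem.List.pyGetD s (-1) 0 - PySem.List.pyGetD s 0 0 ≤ d) ∧
       ¬ (PySem.List.pyGetD s (-2) 0 - PySem.List.pyGetD s 1 0 ≤ d))
instance (prices : List Int) (d : Int) (k : Int) : Decidable (Pre_solution prices d k) := by
  unfold Pre_solution; infer_instance

def pvWitness_solution : List Int × Int × Int := ([3, 1, 2], 5, 2)

def Spec_solution (prices : List Int) (d : Int) (k : Int) (out : Int) : Prop := out = solution_alt prices d k
instance (prices : List Int) (d : Int) (k : Int) (out : Int) : Decidable (Spec_solution prices d k out) := by unfold Spec_solution; infer_instance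

-- ===== CLAIM (what is proved, stated in full; the proofs are below) =====
def Claim_equal_solution : Prop := ∀ (prices : List Int) (d : Int) (k : Int), Dom_solution prices d k → Pre_solution prices d k → Spec_solution prices d k (solution prices d k)

-- ===== LEMMAS AND PROOFS =====

-- Reference index scan over windows; bridge between A's deque loop and B's binary-search loop.
def scanW (s : List Int) (d : Int) (k : Int) : Nat → Nat → Option Int
  | 0, _ => none
  | fuel+1, i =>
    if 1 ≤ k ∧ (i : Int) + k ≤ (s.length : Int) then
      if PySem.List.pyGetD s ((i : Int) + k - 1) 0 - PySem.List.pyGetD s (i : Int) 0 ≤ d then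
        some (PySem.Int.floordiv (PySem.List.slice s (some (i : Int)) (some ((i : Int) + k))).sum k)
      else scanW s d k fuel (i+1)
    else none

lemma loopA_neg (s : List Int) (d k : Int) (hk : k < 0) :
    ∀ rem idx, solutionLoopA s d k rem idx [] 0 = none := by
  intro rem
  induction rem with
  | zero => intro idx; rfl
  | succ n ih =>
    intro idx
    simp only [solutionLoopA]
    have h1 : ¬ ((([] : List Int).length : Int) < k) := by simp; omega
    have h2 : ¬ ((([] : List Int).length : Int) = k) := by simp; omega
    simp only [h1, if_false, h2]
    exact ih (idx+1)

lemma scanW_fuel (s : List Int) (d k : Int) (hk : 1 ≤ k) :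
    ∀ f₁ f₂ i, s.length + 2 ≤ f₁ + i + k.toNat → s.length + 2 ≤ f₂ + i + k.toNat →
      scanW s d k f₁ i = scanW s d k f₂ i := by
  intro f₁
  induction f₁ with
  | zero =>
    intro f₂ i h1 h2
    have hguard : ¬ (1 ≤ k ∧ (i : Int) + k ≤ (s.length : Int)) := by
      intro ⟨_, h⟩; omega
    cases f₂ with
    | zero => rfl
    | succ m => simp only [scanW, hguard, if_false]
  | succ n ih =>
    intro f₂ i h1 h2
    by_cases hguard : 1 ≤ k ∧ (i : Int) + k ≤ (s.length : Int)
    · have hf2 : ∃ m, f₂ = m + 1 := by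
        cases f₂ with
        | zero => exfalso; obtain ⟨_, h⟩ := hguard; omega
        | succ m => exact ⟨m, rfl⟩
      obtain ⟨m, rfl⟩ := hf2
      simp only [scanW, hguard]
      by_cases hc : PySem.List.pyGetD s ((i : Int) + k - 1) 0 - PySem.List.pyGetD s (i : Int) 0 ≤ d
      · rw [if_pos hc, if_pos hc]
      · rw [if_neg hc, if_neg hc]
        exact ih m (i+1) (by omega) (by omega)
    · cases f₂ with
      | zero => simp only [scanW, hguard, if_false]
      | succ m => simp only [scanW, hguard, if_false]

lemma sum_drop_one (l : List Int) (h : l ≠ []) : (l.drop 1).sum = l.sum - l.getD 0 0 := by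
  cases l with
  | nil => exact absurd rfl h
  | cons a t => simp [List.getD]

lemma loopA_eq_scanW (s : List Int) (d k : Int) (hk : 1 ≤ k) :
    ∀ rem idx, idx + rem = s.length →
      solutionLoopA s d k rem idx ((s.take idx).drop (idx + 1 - k.toNat))
          ((s.take idx).drop (idx + 1 - k.toNat)).sum
        = scanW s d k (rem + 1) (idx + 1 - k.toNat) := by
  have hkn : (k.toNat : Int) = k := Int.toNat_of_nonneg (by omega)
  intro rem
  induction rem with
  | zero =>
    intro idx h
    have hguard : ¬ (1 ≤ k ∧ ((idx + 1 - k.toNat : Nat) : Int) + k ≤ (s.length : Int)) := by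
      intro ⟨_, hle⟩; omega
    simp only [solutionLoopA, scanW, hguard, if_false]
  | succ rem ih =>
    intro idx h
    have hidx : idx < s.length := by omega
    set W := (s.take idx).drop (idx + 1 - k.toNat) with hW
    have hWlen : W.length = idx - (idx + 1 - k.toNat) := by
      simp [hW, List.length_drop, List.length_take]; omega
    have hg1 : ((W.length : Int) < k) := by omega
    simp only [solutionLoopA, hg1, if_true]
    have hget : PySem.List.pyGetD s (idx : Int) 0 = s.getD idx 0 := by
      simp [PySem.List.pyGetD_natCast]
    set x := s.getD idx 0 with hx
    have hq' : W ++ [x] = (s.take (idx+1)).drop (idx + 1 - k.toNat) := by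
      rw [List.take_add_one]
      have : s[idx]?.toList = [x] := by
        rw [List.getElem?_eq_getElem hidx]
        simp [hx, List.getD_eq_getElem?_getD, List.getElem?_eq_getElem hidx]
      rw [this, List.drop_append_of_le_length (by simp [List.length_take]; omega)]
    have hq'len : (W ++ [x]).length = idx + 1 - (idx + 1 - k.toNat) := by
      simp [hWlen]; omega
    rw [hget]
    by_cases hcase : k.toNat ≤ idx + 1
    · -- window full
      have hi : idx + 1 - k.toNat + k.toNat = idx + 1 := by omega
      have hg2 : (((W ++ [x]).length : Int) = k) := by rw [hq'len]; omega
      simp only [hg2, if_true]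
      set i := idx + 1 - k.toNat with hi'
      have hqdt : W ++ [x] = (s.drop i).take k.toNat := by
        rw [hq', List.drop_take]; congr 1; omega
      have hdne : s.drop i ≠ [] := by
        have : (s.drop i).length = s.length - i := by simp
        intro hnil; rw [hnil] at this; simp at this; omega
      -- head and last of the window
      have hmn : PySem.List.pyGetD (W ++ [x]) 0 0 = s.getD i 0 := by
        rw [PySem.List.pyGetD_zero, hqdt]
        rw [List.getD_eq_getElem?_getD, List.getD_eq_getElem?_getD]
        rw [List.getElem?_take_of_lt (by omega), List.getElem?_drop]
        simp
      have hmx : PySem.List.pyGetD (W ++ [x]) (-1) 0 = s.getD idx 0 := by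
        rw [PySem.List.pyGetD_neg_one_append_singleton]
      -- scanW side index arithmetic
      have hBidx : ((i : Int) + k - 1) = (idx : Int) := by omega
      have hBguard : (1 ≤ k ∧ (i : Int) + k ≤ (s.length : Int)) := ⟨hk, by omega⟩
      have hslice : PySem.List.slice s (some (i : Int)) (some ((i : Int) + k)) = W ++ [x] := by
        have h2 := PySem.List.slice_natCast_add s i k.toNat
        rw [hkn] at h2
        rw [h2, hqdt]
      rw [hmx, hmn, scanW, if_pos hBguard, hBidx]
      simp only [PySem.List.pyGetD_natCast]
      by_cases hcond : s.getD idx 0 - s.getD i 0 ≤ d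
      · rw [if_pos hcond, if_pos hcond, hslice]
        have hsum : W.sum + x = (W ++ [x]).sum := by simp
        rw [hsum]
      · rw [if_neg hcond, if_neg hcond]
        have hdrop : (W ++ [x]).drop 1 = (s.take (idx+1)).drop (idx + 2 - k.toNat) := by
          rw [hq', List.drop_drop]; congr 1; omega
        have hii : idx + 2 - k.toNat = i + 1 := by omega
        have hsum2 : W.sum + x - s.getD i 0 = ((s.take (idx+1)).drop (idx + 2 - k.toNat)).sum := by
          rw [← hdrop, sum_drop_one (W ++ [x]) (by simp), ← hmn, PySem.List.pyGetD_zero]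
          simp
        rw [hsum2, hdrop, hii]
        have := ih (idx + 1) (by omega)
        rw [show idx + 1 + 1 - k.toNat = i + 1 by omega] at this
        exact this
    · -- still filling
      have hzero : idx + 1 - k.toNat = 0 := by omega
      have hzero2 : idx + 1 + 1 - k.toNat = 0 := by omega
      have hg2 : ¬ (((W ++ [x]).length : Int) = k) := by rw [hq'len]; omega
      simp only [hg2, if_false]
      have hq'' : W ++ [x] = (s.take (idx+1)).drop (idx + 1 + 1 - k.toNat) := by
        rw [hzero2, List.drop_zero, hq', hzero, List.drop_zero]
      have hsum : W.sum + x = ((s.take (idx+1)).drop (idx + 1 + 1 - k.toNat)).sum := by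
        rw [← hq'']; simp
      rw [hsum, hq'', ih (idx + 1) (by omega), hzero2, hzero]
      exact scanW_fuel s d k hk (rem + 1) (rem + 1 + 1) 0 (by omega) (by omega)

-- ---- prefix-sum array characterisation ----

def psums (c : Int) : List Int → List Int
  | [] => []
  | x :: r => (c + x) :: psums (c + x) r

lemma foldl_pref (t : List Int) : ∀ (acc : List Int) (c : Int), acc ≠ [] →
    PySem.List.pyGetD acc (-1) 0 = c →
    t.foldl (fun pref x => pref ++ [PySem.List.pyGetD pref (-1) 0 + x]) acc = acc ++ psums c t := by
  induction t with
  | nil => intro acc c _ _; simp [psums]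
  | cons x r ih =>
    intro acc c hne hlast
    simp only [List.foldl_cons, hlast]
    rw [ih (acc ++ [c + x]) (c + x) (by simp) (PySem.List.pyGetD_neg_one_append_singleton acc (c+x) 0)]
    simp [psums]

lemma psums_length (c : Int) (t : List Int) : (psums c t).length = t.length := by
  induction t generalizing c with
  | nil => rfl
  | cons x r ih => simp [psums, ih]

lemma psums_getD (t : List Int) : ∀ (c : Int) (j : Nat), j < t.length →
    (psums c t).getD j 0 = c + (t.take (j+1)).sum := by
  induction t with
  | nil => intro c j h; simp at h
  | cons x r ih =>
    intro c j h
    cases j with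
    | zero => simp [psums]
    | succ j =>
      simp only [psums, List.getD_cons_succ, List.take_succ_cons, List.sum_cons]
      rw [ih (c + x) j (by simpa using h)]
      ring

lemma pref_getD (s : List Int) (j : Nat) (hj : j ≤ s.length) :
    (s.foldl (fun pref x => pref ++ [PySem.List.pyGetD pref (-1) 0 + x]) [0]).getD j 0
      = (s.take j).sum := by
  rw [foldl_pref s [0] 0 (by simp) (by decide)]
  cases j with
  | zero => simp
  | succ j =>
    have : ([(0 : Int)] ++ psums 0 s).getD (j+1) 0 = (psums 0 s).getD j 0 := by
      simp
    rw [this, psums_getD s 0 j (by omega)]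
    simp

lemma pref_length (s : List Int) :
    (s.foldl (fun pref x => pref ++ [PySem.List.pyGetD pref (-1) 0 + x]) [0]).length
      = s.length + 1 := by
  rw [foldl_pref s [0] 0 (by simp) (by decide)]
  simp [psums_length]

lemma sum_take_sub (s : List Int) (a b : Nat) (hab : a ≤ b) :
    (s.take b).sum - (s.take a).sum = ((s.drop a).take (b - a)).sum := by
  have h : s.take b = s.take a ++ (s.drop a).take (b - a) := by
    rw [← List.take_add]
    congr 1
    omega
  rw [h, List.sum_append]
  ring

-- ---- binary search characterisation ----

lemma bsearchB_spec (s : List Int) (t : Int)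
    (hmono : ∀ p q : Int, 0 ≤ p → p ≤ q → q < (s.length : Int) →
      PySem.List.pyGetD s p 0 ≤ PySem.List.pyGetD s q 0) :
    ∀ (f : Nat) (lo hi : Int), 0 ≤ lo → lo ≤ hi → hi ≤ (s.length : Int) → hi - lo ≤ (f : Int) →
      lo ≤ bsearchB s t f lo hi ∧ bsearchB s t f lo hi ≤ hi ∧
      (∀ j : Int, lo ≤ j → j < bsearchB s t f lo hi → PySem.List.pyGetD s j 0 ≤ t) ∧
      (∀ j : Int, bsearchB s t f lo hi ≤ j → j < hi → t < PySem.List.pyGetD s j 0) := by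
  intro f
  induction f with
  | zero =>
    intro lo hi h0 hlh hhn hf
    have : lo = hi := by omega
    simp only [bsearchB]
    exact ⟨le_refl _, by omega, fun j h1 h2 => by omega, fun j h1 h2 => by omega⟩
  | succ f ih =>
    intro lo hi h0 hlh hhn hf
    by_cases hlt : lo < hi
    · have hmid := PySem.Int.floordiv_two_mid_bounds (lo := lo) (hi := hi) hlh
      set mid := PySem.Int.floordiv (lo + hi) 2 with hmiddef
      have hmlt : mid < hi := by
        rw [hmiddef, PySem.Int.floordiv_lt_iff_lt_mul (by omega)]
        omega
      simp only [bsearchB, if_pos hlt, ← hmiddef]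
      by_cases hc : PySem.List.pyGetD s mid 0 ≤ t
      · rw [if_pos hc]
        obtain ⟨h1, h2, h3, h4⟩ := ih (mid + 1) hi (by omega) (by omega) hhn (by omega)
        refine ⟨by omega, h2, ?_, h4⟩
        intro j hj1 hj2
        by_cases hjm : j ≤ mid
        · exact le_trans (hmono j mid (by omega) hjm (by omega)) hc
        · exact h3 j (by omega) hj2
      · rw [if_neg hc]
        rw [not_le] at hc
        obtain ⟨h1, h2, h3, h4⟩ := ih lo mid h0 (by omega) (by omega) (by omega)
        refine ⟨h1, by omega, h3, ?_⟩
        intro j hj1 hj2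
        by_cases hjm : mid ≤ j
        · exact lt_of_lt_of_le hc (hmono mid j (by omega) hjm (by omega))
        · exact h4 j hj1 (by omega)
    · simp only [bsearchB, if_neg hlt]
      exact ⟨le_refl _, by omega, fun j h1 h2 => by omega, fun j h1 h2 => by omega⟩

lemma bsearch_cond (s : List Int) (d k : Int) (hk : 1 ≤ k) (i : Nat)
    (hik : (i : Int) + k ≤ (s.length : Int))
    (hmono : ∀ p q : Int, 0 ≤ p → p ≤ q → q < (s.length : Int) →
      PySem.List.pyGetD s p 0 ≤ PySem.List.pyGetD s q 0) :
    (k ≤ bsearchB s (PySem.List.pyGetD s (i : Int) 0 + d) (s.length + 1) (i : Int) (s.length : Int) - (i : Int))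
      ↔ (PySem.List.pyGetD s ((i : Int) + k - 1) 0 - PySem.List.pyGetD s (i : Int) 0 ≤ d) := by
  obtain ⟨h1, h2, h3, h4⟩ := bsearchB_spec s (PySem.List.pyGetD s (i : Int) 0 + d) hmono
    (s.length + 1) (i : Int) (s.length : Int) (by omega) (by omega) (le_refl _) (by push_cast; omega)
  set r := bsearchB s (PySem.List.pyGetD s (i : Int) 0 + d) (s.length + 1) (i : Int) (s.length : Int)
  constructor
  · intro h
    have := h3 ((i : Int) + k - 1) (by omega) (by omega)
    omega
  · intro h
    by_contra hcon
    have := h4 ((i : Int) + k - 1) (by omega) (by omega)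
    omega

lemma loopB_eq_scanW (s pref : List Int) (d k : Int) (hk : 1 ≤ k)
    (hmono : ∀ p q : Int, 0 ≤ p → p ≤ q → q < (s.length : Int) →
      PySem.List.pyGetD s p 0 ≤ PySem.List.pyGetD s q 0)
    (hpref : ∀ j : Nat, j ≤ s.length → pref.getD j 0 = (s.take j).sum) :
    ∀ (f i : Nat), solutionLoopB s pref d k f i = scanW s d k f i := by
  intro f
  induction f with
  | zero => intro i; rfl
  | succ f ih =>
    intro i
    by_cases hg : (i : Int) + k ≤ (s.length : Int)
    · have hg1 : (i : Int) < (s.length : Int) - k + 1 := by omega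
      have hg2 : (1 ≤ k ∧ (i : Int) + k ≤ (s.length : Int)) := ⟨hk, hg⟩
      simp only [solutionLoopB, scanW, if_pos hg1, if_pos hg2]
      rw [show (if k ≤ bsearchB s (PySem.List.pyGetD s (i : Int) 0 + d) (s.length + 1) (i : Int) (s.length : Int) - (i : Int)
            then some (PySem.Int.floordiv (PySem.List.pyGetD pref ((i : Int) + k) 0 - PySem.List.pyGetD pref (i : Int) 0) k)
            else solutionLoopB s pref d k f (i+1))
          = (if PySem.List.pyGetD s ((i : Int) + k - 1) 0 - PySem.List.pyGetD s (i : Int) 0 ≤ d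
            then some (PySem.Int.floordiv (PySem.List.pyGetD pref ((i : Int) + k) 0 - PySem.List.pyGetD pref (i : Int) 0) k)
            else solutionLoopB s pref d k f (i+1)) from by
        rw [if_congr (bsearch_cond s d k hk i hg hmono) rfl rfl]]
      by_cases hc : PySem.List.pyGetD s ((i : Int) + k - 1) 0 - PySem.List.pyGetD s (i : Int) 0 ≤ d
      · rw [if_pos hc, if_pos hc]
        have hik : (i : Int) + k = ((i + k.toNat : Nat) : Int) := by push_cast; omega
        have hsum : PySem.List.pyGetD pref ((i : Int) + k) 0 - PySem.List.pyGetD pref (i : Int) 0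
            = (PySem.List.slice s (some (i : Int)) (some ((i : Int) + k))).sum := by
          rw [hik]
          simp only [PySem.List.pyGetD_natCast]
          rw [hpref (i + k.toNat) (by omega), hpref i (by omega),
            sum_take_sub s i (i + k.toNat) (by omega)]
          rw [PySem.List.slice_natCast]
        rw [hsum]
      · rw [if_neg hc, if_neg hc]
        exact ih (i+1)
    · have hg1 : ¬ ((i : Int) < (s.length : Int) - k + 1) := by omega
      have hg2 : ¬ (1 ≤ k ∧ (i : Int) + k ≤ (s.length : Int)) := by intro ⟨_, h⟩; omega
      simp only [solutionLoopB, scanW, if_neg hg1, if_neg hg2]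

-- ===== VERDICT (by name: the statement is the Claim_ definition above) =====
theorem solution_spec : Claim_equal_solution := by
  unfold Claim_equal_solution
  intro prices d k _ hpre
  simp only [Pre_solution] at hpre
  obtain ⟨hne, hp1, hp2, hp3⟩ := hpre
  simp only [Spec_solution, solution, solution_alt]
  set s := PySem.List.sorted prices (fun x => x) false with hs
  set pref := s.foldl (fun pref x => pref ++ [PySem.List.pyGetD pref (-1) 0 + x]) [0] with hprefdef
  have hsne : s ≠ [] := by
    intro h0
    apply hne
    have hperm := PySem.List.sorted_perm prices (fun x : Int => x) false
    rw [← hs, h0] at hperm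
    exact hperm.nil_eq.symm
  have hslen : 1 ≤ s.length := by
    cases hsl : s.length with
    | zero => exact absurd (List.length_eq_zero_iff.mp hsl) hsne
    | succ m => omega
  have hpref : ∀ j : Nat, j ≤ s.length → pref.getD j 0 = (s.take j).sum := by
    intro j hj; rw [hprefdef]; exact pref_getD s j hj
  by_cases h1 : PySem.List.pyGetD s (-1) 0 - PySem.List.pyGetD s 0 0 ≤ d
  · simp only [h1, if_true]
    rw [show PySem.List.pyGetD pref ((s.length : Nat) : Int) 0 = pref.getD s.length 0 from by
      simp [PySem.List.pyGetD_natCast]]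
    rw [hpref s.length (le_refl _), List.take_length]
  · simp only [h1, if_false]
    by_cases h2 : PySem.List.pyGetD s (-2) 0 - PySem.List.pyGetD s 1 0 ≤ d
    · simp only [h2, if_true]
      have hn2 : 2 ≤ s.length := by
        by_cases hlen1 : s.length = 1
        · exfalso
          obtain ⟨a, ha⟩ := List.length_eq_one_iff.mp hlen1
          apply hp1
          refine ⟨hlen1, ?_⟩
          rw [ha] at h1
          simp [pysem] at h1
          omega
        · omega
      have hlen' : ((s.dropLast.drop 1).length : Int) = (s.length : Int) - 2 := by
        simp only [List.length_drop, List.length_dropLast]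
        omega
      have hd : s.dropLast.drop 1 = (s.drop 1).take (s.length - 2) := by
        rw [List.dropLast_eq_take, List.drop_take]
        congr 1
      have hplen : 1 < pref.length := by rw [hprefdef, pref_length]; omega
      have hb1 : PySem.List.pyGetD pref ((s.length : Int) - 1) 0 = pref.getD (s.length - 1) 0 := by
        rw [show (s.length : Int) - 1 = ((s.length - 1 : Nat) : Int) from by omega]
        simp [PySem.List.pyGetD_natCast]
      have hb2 : PySem.List.pyGetD pref 1 0 = pref.getD 1 0 := by
        rw [show (1 : Int) = ((1 : Nat) : Int) from rfl, PySem.List.pyGetD_natCast]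
      rw [hlen', hd, hb1, hb2, hpref (s.length - 1) (by omega), hpref 1 (by omega),
        sum_take_sub s 1 (s.length - 1) (by omega),
        show s.length - 1 - 1 = s.length - 2 from by omega]
    · simp only [h2, if_false]
      rcases lt_trichotomy k 0 with hk | hk | hk
      · rw [loopA_neg s d k hk s.length 0, if_neg (by omega : ¬ (1 ≤ k))]
      · exact absurd ⟨hk, h1, h2⟩ hp3
      · have hk1 : 1 ≤ k := by omega
        have hmono : ∀ p q : Int, 0 ≤ p → p ≤ q → q < (s.length : Int) →
            PySem.List.pyGetD s p 0 ≤ PySem.List.pyGetD s q 0 := by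
          intro p q hp hpq hq
          have hp' : p.toNat ≤ q.toNat := by omega
          have hq' : q.toNat < s.length := by omega
          rw [PySem.List.pyGetD_eq_getElem s (i := p) 0 hp (by omega),
            PySem.List.pyGetD_eq_getElem s (i := q) 0 (by omega) (by omega)]
          exact PySem.List.sorted_id_getElem_mono prices hp' hq'
        have hmain := loopA_eq_scanW s d k hk1 s.length 0 (by omega)
        simp only [List.take_zero, List.drop_nil, List.sum_nil] at hmain
        rw [show 0 + 1 - k.toNat = 0 by omega] at hmain
        rw [hmain, if_pos hk1, loopB_eq_scanW s pref d k hk1 hmono hpref (s.length + 1) 0]
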